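-- pv_equiv track=rewrite | github.com/BatchClayderman/someAC | halfC.py | method3
-- ===== SOURCE A (Python) =====
-- def method3(maxDigit:int = 4) -> int:
-- 	count = 9
-- 	leftVector = (0, ) + (1, ) * 9 # vector[sum]
-- 	rightVector = (1, ) * 10 # vector[sum]
--
-- 	for digit in range(1, maxDigit):
-- 		cut2 = digit * 9 + 1
-- 		cut1 = cut2 - 10
-- 		leftVector = tuple(sum(leftVector[:i]) for i in range(1, 10)) + tuple(sum(leftVector[i:i + 10]) for i in range(cut1)) + tuple(sum(leftVector[i:]) for i in range(cut1, cut2))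
-- 		rightVector = tuple(sum(rightVector[:i]) for i in range(1, 10)) + tuple(sum(rightVector[i:i + 10]) for i in range(cut1)) + tuple(sum(rightVector[i:]) for i in range(cut1, cut2))
-- 		for i in range(cut2 + 9):
-- 			count += leftVector[i] * rightVector[i]
--
-- 	return count
-- ===== SOURCE B (Python) =====
-- def method3(maxDigit: int = 4) -> int:
-- 	# Mathematically, A's right vector is the digit-sum distribution of d free
-- 	# digits 0..9, and its left vector is that distribution minus the previous
-- 	# one (first digit forced nonzero).  So we keep only ONE vector, update it
-- 	# with a sliding-window convolution against a uniform digit, and read the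
-- 	# left values off as cur[i] - prev[i].
-- 	count = 9
-- 	prev = [1]
-- 	cur = [1] * 10
-- 	for _digit in range(1, maxDigit):
-- 		prev, cur = cur, _convolveDigit(cur)
-- 		for i, x in enumerate(cur):
-- 			p = prev[i] if i < len(prev) else 0
-- 			count += (x - p) * x
-- 	return count
--
--
-- def _convolveDigit(v):
-- 	# new[j] = sum of v[max(0, j-9) .. min(j, len(v)-1)], via a running window
-- 	n = len(v)
-- 	out = []
-- 	s = 0
-- 	for j in range(n + 9):
-- 		if j < n:
-- 			s += v[j]
-- 		if j >= 10:
-- 			s -= v[j - 10]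
-- 		out.append(s)
-- 	return out
-- ===== Notes on version B (the rewrite author's own statement) =====
-- stated objective: alternative
-- what changed: B keeps only one distribution vector: each iteration does a single sliding-window convolution (constant work per entry) and recovers A's left vector as cur[i] - prev[i], instead of rebuilding two vectors with a slice-sum per entry and taking their dot product.
import Mathlib
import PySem

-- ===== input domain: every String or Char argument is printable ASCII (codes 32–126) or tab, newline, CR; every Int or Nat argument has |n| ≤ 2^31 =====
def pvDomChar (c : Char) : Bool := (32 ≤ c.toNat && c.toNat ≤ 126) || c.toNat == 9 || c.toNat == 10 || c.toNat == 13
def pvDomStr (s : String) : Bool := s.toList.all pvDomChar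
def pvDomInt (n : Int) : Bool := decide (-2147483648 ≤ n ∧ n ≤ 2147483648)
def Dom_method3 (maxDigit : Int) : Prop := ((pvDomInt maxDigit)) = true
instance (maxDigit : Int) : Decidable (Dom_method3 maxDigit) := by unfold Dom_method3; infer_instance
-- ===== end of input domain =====

-- B keeps a single digit-sum distribution vector updated by a sliding-window
-- convolution (A's right vector) and reads A's left vector off as the difference
-- between the current and the previous distribution (objective: alternative
-- algorithm; not claimed faster).

-- ===== PORT A =====
-- the vector-update expression A writes twice (once per vector), as a named helper
def stepA (cut1 cut2 : Int) (v : List Int) : List Int :=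
  ((PySem.List.pyRange 1 10 1).map (fun i => (PySem.List.slice v none (some i)).sum))
  ++ ((PySem.List.pyRange 0 cut1 1).map (fun i => (PySem.List.slice v (some i) (some (i + 10))).sum))
  ++ ((PySem.List.pyRange cut1 cut2 1).map (fun i => (PySem.List.slice v (some i) none).sum))

def bodyA (st : Int × List Int × List Int) (digit : Int) : Int × List Int × List Int :=
  let cut2 := digit * 9 + 1
  let cut1 := cut2 - 10
  let l := stepA cut1 cut2 st.2.1
  let r := stepA cut1 cut2 st.2.2
  ((PySem.List.pyRange 0 (cut2 + 9) 1).foldl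
      (fun c i => c + PySem.List.pyGetD l i 0 * PySem.List.pyGetD r i 0) st.1, l, r)

def method3 (maxDigit : Int) : Int :=
  ((PySem.List.pyRange 1 maxDigit 1).foldl bodyA
      (9, 0 :: List.replicate 9 1, List.replicate 10 1)).1

-- ===== PORT B =====
-- n = len(v); out = []; s = 0
-- for j in range(n + 9):  s += v[j] if j < n;  s -= v[j-10] if j >= 10;  out.append(s)
def convolveDigit (v : List Int) : List Int :=
  ((PySem.List.pyRange 0 ((v.length : Int) + 9) 1).foldl
    (fun (st : List Int × Int) j =>
      let s1 := if j < (v.length : Int) then st.2 + PySem.List.pyGetD v j 0 else st.2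
      let s2 := if 10 ≤ j then s1 - PySem.List.pyGetD v (j - 10) 0 else s1
      (st.1 ++ [s2], s2)) ([], 0)).1

-- state: (count, prev, cur);  prev, cur = cur, _convolveDigit(cur)
def bodyB (st : Int × List Int × List Int) (_digit : Int) : Int × List Int × List Int :=
  let prev := st.2.2
  let cur := convolveDigit st.2.2
  ((PySem.List.enumerate cur 0).foldl
      (fun c ix =>
        let p := if ix.1 < (prev.length : Int) then PySem.List.pyGetD prev ix.1 0 else 0
        c + (ix.2 - p) * ix.2) st.1, prev, cur)

def method3_alt (maxDigit : Int) : Int :=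
  ((PySem.List.pyRange 1 maxDigit 1).foldl bodyB (9, [1], List.replicate 10 1)).1

-- ===== PRECONDITION & SPEC =====
def Spec_method3 (maxDigit : Int) (out : Int) : Prop := out = method3_alt maxDigit
instance (maxDigit : Int) (out : Int) : Decidable (Spec_method3 maxDigit out) := by unfold Spec_method3; infer_instance

-- ===== CLAIM (what is proved, stated in full; the proofs are below) =====
def Claim_equal_method3 : Prop := ∀ (maxDigit : Int), Dom_method3 maxDigit → Spec_method3 maxDigit (method3 maxDigit)

-- ===== LEMMAS AND PROOFS =====

-- prefix sums and window sums of a vector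
def preS (v : List Int) (k : Nat) : Int := (v.take k).sum
def win (v : List Int) (j : Nat) : Int := preS v (j + 1) - preS v (j - 9)
-- A's left vector as a function of B's two distributions
def subPad (cur prev : List Int) : List Int :=
  (List.range cur.length).map (fun k => cur.getD k 0 - prev.getD k 0)

lemma length_subPad (cur prev : List Int) : (subPad cur prev).length = cur.length := by
  simp [subPad]

lemma preS_succ (v : List Int) (k : Nat) : preS v (k + 1) = preS v k + v.getD k 0 := by
  simp only [preS, List.take_add_one, List.sum_append, List.getD]
  cases v[k]? <;> simp

lemma preS_of_le (v : List Int) (k : Nat) (h : v.length ≤ k) : preS v k = v.sum := by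
  simp [preS, List.take_of_length_le h]

lemma win_of_ge (v : List Int) (j : Nat) (h : v.length + 9 ≤ j) : win v j = 0 := by
  unfold win
  rw [preS_of_le v (j + 1) (by omega), preS_of_le v (j - 9) (by omega)]
  ring

lemma sum_drop_take (v : List Int) (a m : Nat) :
    ((v.drop a).take m).sum = preS v (a + m) - preS v a := by
  have h := congrArg List.sum (List.take_add (l := v) (i := a) (j := m))
  simp only [List.sum_append] at h
  simp only [preS]; omega

lemma sum_drop (v : List Int) (a : Nat) :
    (v.drop a).sum = v.sum - preS v a := by
  have h := congrArg List.sum (List.take_append_drop a v)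
  simp only [List.sum_append] at h
  simp only [preS]; omega

lemma stepA_char (cut1 cut2 : Int) (v : List Int) (h1 : 0 ≤ cut1) (h2 : cut2 = cut1 + 10)
    (hlen : (v.length : Int) = cut2) :
    stepA cut1 cut2 v = (List.range (v.length + 9)).map (win v) := by
  have hn : v.length = cut1.toNat + 10 := by omega
  have hsplit : List.range (v.length + 9)
      = List.range 9 ++ (((List.range cut1.toNat).map (fun x => 9 + x))
        ++ ((List.range 10).map (fun x => 9 + (cut1.toNat + x)))) := by
    rw [show v.length + 9 = 9 + (cut1.toNat + 10) by omega, List.range_add, List.range_add,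
        List.map_append, List.map_map]
    rfl
  rw [hsplit, stepA, List.map_append, List.map_append, List.map_map, List.map_map,
      PySem.List.pyRange_one 1 10, PySem.List.pyRange_one 0 cut1,
      PySem.List.pyRange_one cut1 cut2, List.map_map, List.map_map, List.map_map,
      show ((10 : Int) - 1).toNat = 9 from rfl, show (cut1 - 0).toNat = cut1.toNat by omega,
      show (cut2 - cut1).toNat = 10 by omega, List.append_assoc]
  refine congrArg₂ (· ++ ·) ?_ (congrArg₂ (· ++ ·) ?_ ?_)
  · refine List.map_congr_left fun k hk => ?_
    rw [List.mem_range] at hk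
    simp only [Function.comp]
    rw [PySem.List.slice_to v (by omega), show ((1 : Int) + k).toNat = k + 1 by omega]
    unfold win
    rw [show k - 9 = 0 by omega]
    simp [preS]
  · refine List.map_congr_left fun k hk => ?_
    rw [List.mem_range] at hk
    simp only [Function.comp]
    rw [show (0 : Int) + (k : Int) = ((k : Nat) : Int) by omega,
        show ((k : Nat) : Int) + 10 = ((k : Nat) : Int) + ((10 : Nat) : Int) by norm_num,
        PySem.List.slice_natCast_add, sum_drop_take]
    unfold win
    rw [show 9 + k - 9 = k by omega, show 9 + k + 1 = k + 10 by omega]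
  · refine List.map_congr_left fun k hk => ?_
    rw [List.mem_range] at hk
    simp only [Function.comp]
    rw [show cut1 + (k : Int) = ((cut1.toNat + k : Nat) : Int) by omega,
        PySem.List.slice_from_natCast, sum_drop]
    unfold win
    rw [show 9 + (cut1.toNat + k) - 9 = cut1.toNat + k by omega,
        preS_of_le v (9 + (cut1.toNat + k) + 1) (by omega)]

lemma convFold (v : List Int) (T : Nat) :
    ((PySem.List.pyRange 0 (T : Int) 1).foldl
      (fun (st : List Int × Int) j =>
        let s1 := if j < (v.length : Int) then st.2 + PySem.List.pyGetD v j 0 else st.2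
        let s2 := if 10 ≤ j then s1 - PySem.List.pyGetD v (j - 10) 0 else s1
        (st.1 ++ [s2], s2)) ([], 0))
    = ((List.range T).map (win v), preS v T - preS v (T - 10)) := by
  induction T with
  | zero => simp [PySem.List.pyRange_one_eq_nil, preS]
  | succ T ih =>
    rw [show ((T + 1 : Nat) : Int) = (T : Int) + 1 by push_cast; ring,
        PySem.List.pyRange_one_succ_right (by positivity), List.foldl_append, ih,
        List.foldl_cons, List.foldl_nil]
    have hs2 : (if (10 : Int) ≤ (T : Int) then
          (if (T : Int) < (v.length : Int) then
              (preS v T - preS v (T - 10)) + PySem.List.pyGetD v (T : Int) 0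
            else preS v T - preS v (T - 10))
            - PySem.List.pyGetD v ((T : Int) - 10) 0
        else (if (T : Int) < (v.length : Int) then
              (preS v T - preS v (T - 10)) + PySem.List.pyGetD v (T : Int) 0
            else preS v T - preS v (T - 10))) = win v T := by
      have h1 : (if (T : Int) < (v.length : Int) then
            (preS v T - preS v (T - 10)) + PySem.List.pyGetD v (T : Int) 0
          else preS v T - preS v (T - 10))
          = preS v (T + 1) - preS v (T - 10) := by
        rw [preS_succ]
        by_cases h : (T : Int) < (v.length : Int)
        · rw [if_pos h, PySem.List.pyGetD_natCast]; ring
        · rw [if_neg h, List.getD_eq_default _ _ (by omega)]; ring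
      rw [h1]
      by_cases h10 : (10 : Int) ≤ (T : Int)
      · rw [if_pos h10, show (T : Int) - 10 = ((T - 10 : Nat) : Int) by omega,
            PySem.List.pyGetD_natCast]
        unfold win
        have : preS v (T - 9) = preS v (T - 10) + v.getD (T - 10) 0 := by
          rw [show T - 9 = (T - 10) + 1 by omega, preS_succ]
        omega
      · rw [if_neg h10]
        unfold win
        rw [show T - 9 = 0 by omega, show T - 10 = 0 by omega]
    simp only [hs2, Prod.mk.injEq]
    refine ⟨?_, ?_⟩
    · rw [List.range_succ, List.map_append, List.map_cons, List.map_nil]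
    · rw [show T + 1 - 10 = T - 9 by omega]
      rfl

lemma convolveDigit_char (v : List Int) :
    convolveDigit v = (List.range (v.length + 9)).map (win v) := by
  unfold convolveDigit
  rw [show (v.length : Int) + 9 = ((v.length + 9 : Nat) : Int) by push_cast; ring, convFold]

lemma length_convolveDigit (v : List Int) : (convolveDigit v).length = v.length + 9 := by
  rw [convolveDigit_char]; simp

lemma preS_subPad (cur prev : List Int) (hp : prev.length ≤ cur.length) (k : Nat) :
    preS (subPad cur prev) k = preS cur k - preS prev k := by
  induction k with
  | zero => simp [preS]
  | succ k ih =>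
    rw [preS_succ, preS_succ, preS_succ, ih]
    by_cases h : k < cur.length
    · rw [show (subPad cur prev).getD k 0 = cur.getD k 0 - prev.getD k 0 by
        simp [subPad, List.getD, h]]
      ring
    · rw [List.getD_eq_default _ _ (by simp [length_subPad]; omega),
          List.getD_eq_default cur _ (by omega), List.getD_eq_default prev _ (by omega)]
      ring

lemma win_subPad (cur prev : List Int) (hp : prev.length ≤ cur.length) (j : Nat) :
    win (subPad cur prev) j = win cur j - win prev j := by
  unfold win
  rw [preS_subPad cur prev hp, preS_subPad cur prev hp]
  ring

lemma getD_map_range' (f : Nat → Int) (n k : Nat) :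
    ((List.range n).map f).getD k 0 = if k < n then f k else 0 := by
  by_cases h : k < n
  · rw [if_pos h, List.getD_eq_getElem _ _ (by simpa using h)]
    simp
  · rw [if_neg h, List.getD_eq_default _ _ (by simpa using h)]

lemma subPad_conv (prev cur : List Int)
    (h : cur = (List.range (prev.length + 9)).map (win prev)) :
    (List.range (cur.length + 9)).map (win (subPad cur prev)) = subPad (convolveDigit cur) cur := by
  have hlen : cur.length = prev.length + 9 := by rw [h]; simp
  have hgoal : subPad (convolveDigit cur) cur
      = (List.range (cur.length + 9)).map (fun j => win cur j - win prev j) := by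
    unfold subPad
    rw [length_convolveDigit]
    refine List.map_congr_left fun j hj => ?_
    rw [List.mem_range] at hj
    rw [convolveDigit_char, getD_map_range' (win cur) _ _, if_pos hj]
    congr 1
    by_cases hc : j < cur.length
    · rw [h, getD_map_range', if_pos (by omega)]
    · rw [List.getD_eq_default _ _ (by omega), win_of_ge prev j (by omega)]
  rw [hgoal]
  refine List.map_congr_left fun j _ => ?_
  rw [win_subPad cur prev (by omega)]

lemma count_eq (prev cur : List Int) (c0 : Int) (_hp : prev.length ≤ cur.length) :
    (PySem.List.pyRange 0 ((cur.length : Int)) 1).foldl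
      (fun c i => c + PySem.List.pyGetD (subPad cur prev) i 0 * PySem.List.pyGetD cur i 0) c0
    = (PySem.List.enumerate cur 0).foldl
      (fun c ix =>
        let p := if ix.1 < (prev.length : Int) then PySem.List.pyGetD prev ix.1 0 else 0
        c + (ix.2 - p) * ix.2) c0 := by
  rw [PySem.List.enumerate_eq_map_pyRange (d := 0), List.foldl_map]
  refine PySem.List.foldl_congr_mem _ _ _ c0 fun c i hi => ?_
  rw [PySem.List.mem_pyRange_one] at hi
  obtain ⟨k, rfl⟩ : ∃ k : Nat, i = (k : Int) := ⟨i.toNat, by omega⟩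
  have hk : k < cur.length := by omega
  simp only [PySem.List.pyGetD_natCast]
  have hsub : (subPad cur prev).getD k 0 = cur.getD k 0 - prev.getD k 0 := by
    simp [subPad, List.getD, hk]
  rw [hsub]
  by_cases h : (k : Int) < (prev.length : Int)
  · rw [if_pos h]
  · rw [if_neg h, List.getD_eq_default prev _ (by omega)]

-- the loop invariant: A's state vs B's state after processing digits 1 .. k-1
def RelAB (sA sB : Int × List Int × List Int) (k : Int) : Prop :=
  sA.1 = sB.1 ∧ sA.2.2 = sB.2.2 ∧ sA.2.1 = subPad sB.2.2 sB.2.1 ∧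
  sB.2.2 = (List.range (sB.2.1.length + 9)).map (win sB.2.1) ∧
  (sB.2.1.length : Int) = 9 * (k - 1) + 1 ∧ (sB.2.2.length : Int) = 9 * k + 1

lemma bodyStep (sA sB : Int × List Int × List Int) (n : Int) (hn : 1 ≤ n)
    (h : RelAB sA sB n) : RelAB (bodyA sA n) (bodyB sB n) (n + 1) := by
  obtain ⟨cA, L, R⟩ := sA
  obtain ⟨cB, prev, cur⟩ := sB
  obtain ⟨hc, hR, hL, hcur, hlp, hlc⟩ := h
  simp only at hc hR hL hcur hlp hlc
  subst hc hR hL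
  have hr : stepA (n * 9 + 1 - 10) (n * 9 + 1) R = convolveDigit R := by
    rw [stepA_char _ _ R (by omega) (by omega) (by omega), convolveDigit_char]
  have hl : stepA (n * 9 + 1 - 10) (n * 9 + 1) (subPad R prev)
      = subPad (convolveDigit R) R := by
    rw [stepA_char _ _ _ (by omega) (by omega) (by rw [length_subPad]; omega),
        length_subPad, subPad_conv prev R hcur]
  unfold RelAB bodyA bodyB
  simp only [hr, hl]
  refine ⟨?_, trivial, trivial, convolveDigit_char R, by omega, ?_⟩
  · rw [show n * 9 + 1 + 9 = (((convolveDigit R).length : Nat) : Int) by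
        rw [length_convolveDigit]; omega]
    exact count_eq R (convolveDigit R) cA (by rw [length_convolveDigit]; omega)
  · rw [length_convolveDigit]; push_cast; omega

lemma key (k : Int) (hk : 1 ≤ k) :
    RelAB ((PySem.List.pyRange 1 k 1).foldl bodyA (9, 0 :: List.replicate 9 1, List.replicate 10 1))
        ((PySem.List.pyRange 1 k 1).foldl bodyB (9, [1], List.replicate 10 1)) k := by
  induction k, hk using Int.le_induction with
  | base =>
    rw [PySem.List.pyRange_one_eq_nil (le_refl 1), List.foldl_nil, List.foldl_nil]
    exact ⟨rfl, rfl, by decide, by decide, by decide, by decide⟩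
  | succ n hn ih =>
    rw [PySem.List.pyRange_one_succ_right (a := 1) (b := n) (by omega), List.foldl_append,
        List.foldl_append, List.foldl_cons, List.foldl_nil, List.foldl_cons, List.foldl_nil]
    exact bodyStep _ _ n hn ih

-- ===== VERDICT (by name: the statement is the Claim_ definition above) =====
theorem method3_spec : Claim_equal_method3 := by
  intro m _
  unfold Spec_method3 method3 method3_alt
  by_cases hm : m ≤ 1
  · rw [PySem.List.pyRange_one_eq_nil hm]
    rfl
  · exact (key m (by omega)).1
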